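-- pv_equiv track=rewrite | github.com/xenostalgic/adventofcode2022 | 23.py | compare_pos_sets
-- ===== SOURCE A (Python) =====
-- def compare_pos_sets(pos1: set, pos2: set):
--     miny1 = min([py for py,px in pos1])
--     minx1 = min([px for py,px in pos1])
--     miny2 = min([py for py,px in pos2])
--     minx2 = min([px for py,px in pos2])
--     pos1_base = set([(py-miny1, px-minx1) for py,px in pos1])
--     pos2_base = set([(py-miny2, px-minx2) for py,px in pos2])
--     return pos1_base == pos2_base
-- ===== SOURCE B (Python) =====
-- def compare_pos_sets(pos1: set, pos2: set):
--     if len(pos1) != len(pos2):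
--         return False
--     s1 = sorted(pos1)
--     s2 = sorted(pos2)
--     dy, dx = s2[0][0] - s1[0][0], s2[0][1] - s1[0][1]
--     return all(b == (a[0] + dy, a[1] + dx) for a, b in zip(s1, s2))
-- ===== Notes on version B (the rewrite author's own statement) =====
-- stated objective: alternative
-- what changed: A normalizes both point sets to their min corner and compares the two normalized sets for set equality; B instead sorts both sets lexicographically, takes the offset between the two smallest points and checks positionally along the zipped sorted lists that every pair differs by that same offset (no sets, no hashing).
import Mathlib
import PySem

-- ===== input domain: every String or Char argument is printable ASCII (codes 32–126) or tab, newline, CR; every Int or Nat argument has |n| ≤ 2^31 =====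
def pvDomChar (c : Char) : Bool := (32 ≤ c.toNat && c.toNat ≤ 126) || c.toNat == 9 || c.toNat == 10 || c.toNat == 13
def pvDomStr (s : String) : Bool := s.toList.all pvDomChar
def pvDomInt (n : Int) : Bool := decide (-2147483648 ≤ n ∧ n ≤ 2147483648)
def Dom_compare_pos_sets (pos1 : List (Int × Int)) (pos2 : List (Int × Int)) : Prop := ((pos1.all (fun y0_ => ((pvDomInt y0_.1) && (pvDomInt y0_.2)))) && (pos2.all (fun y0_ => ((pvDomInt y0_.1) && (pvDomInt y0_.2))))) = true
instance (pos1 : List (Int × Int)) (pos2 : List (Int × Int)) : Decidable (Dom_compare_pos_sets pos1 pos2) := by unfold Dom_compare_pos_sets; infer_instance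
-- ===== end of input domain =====

-- B replaces A's normalize-both-sets-and-compare with sort-both-lexicographically,
-- then one positional zip pass checking a constant offset (objective: alternative).


-- ===== PORT A =====
def compare_pos_sets (pos1 : List (Int × Int)) (pos2 : List (Int × Int)) : Bool :=
  match PySem.List.min? (pos1.map (fun p => p.1)) (fun x => x),
        PySem.List.min? (pos1.map (fun p => p.2)) (fun x => x),
        PySem.List.min? (pos2.map (fun p => p.1)) (fun x => x),
        PySem.List.min? (pos2.map (fun p => p.2)) (fun x => x) with
  | some miny1, some minx1, some miny2, some minx2 =>
      let pos1_base : PySem.Set (Int × Int) :=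
        PySem.Set.ofList (pos1.map (fun p => (p.1 - miny1, p.2 - minx1)))
      let pos2_base : PySem.Set (Int × Int) :=
        PySem.Set.ofList (pos2.map (fun p => (p.1 - miny2, p.2 - minx2)))
      PySem.Set.equal pos1_base pos2_base
  | _, _, _, _ => false   -- unreachable under Pre_ (min of an empty sequence raises ValueError)

-- ===== PORT B =====
-- sorted(pos) on Python tuples compares lexicographically: key = toLex (Prod.Lex order).
def compare_pos_sets_alt (pos1 : List (Int × Int)) (pos2 : List (Int × Int)) : Bool :=
  if pos1.length ≠ pos2.length then false
  else
    let s1 := PySem.List.sorted pos1 (fun p => toLex p)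
    let s2 := PySem.List.sorted pos2 (fun p => toLex p)
    match s1, s2 with
    | a :: _, b :: _ =>
        let dy := b.1 - a.1
        let dx := b.2 - a.2
        (s1.zip s2).all (fun pq => pq.2 == (pq.1.1 + dy, pq.1.2 + dx))
    | _, _ => false   -- unreachable under Pre_ (s2[0] on the empty list raises IndexError)

-- ===== PRECONDITION & SPEC =====
-- Pre_: both sets non-empty (Python's min raises ValueError on an empty set), and the lists
-- are Nodup — the representation invariant of a Python set as a distinct-element list.
def Pre_compare_pos_sets (pos1 : List (Int × Int)) (pos2 : List (Int × Int)) : Prop :=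
  pos1 ≠ [] ∧ pos2 ≠ [] ∧ pos1.Nodup ∧ pos2.Nodup
instance (pos1 : List (Int × Int)) (pos2 : List (Int × Int)) : Decidable (Pre_compare_pos_sets pos1 pos2) := by unfold Pre_compare_pos_sets; infer_instance
def pvWitness_compare_pos_sets : (List (Int × Int)) × (List (Int × Int)) :=
  ([(0,0),(1,2)], [(5,5),(6,7)])

def Spec_compare_pos_sets (pos1 : List (Int × Int)) (pos2 : List (Int × Int)) (out : Bool) : Prop := out = compare_pos_sets_alt pos1 pos2
instance (pos1 : List (Int × Int)) (pos2 : List (Int × Int)) (out : Bool) : Decidable (Spec_compare_pos_sets pos1 pos2 out) := by unfold Spec_compare_pos_sets; infer_instance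

-- ===== CLAIM (what is proved, stated in full; the proofs are below) =====
def Claim_equal_compare_pos_sets : Prop := ∀ (pos1 : List (Int × Int)) (pos2 : List (Int × Int)), Dom_compare_pos_sets pos1 pos2 → Pre_compare_pos_sets pos1 pos2 → Spec_compare_pos_sets pos1 pos2 (compare_pos_sets pos1 pos2)

-- ===== LEMMAS AND PROOFS =====

-- helper used by the proofs: translation by a fixed offset
def pvShift (t p : Int × Int) : Int × Int := (p.1 + t.1, p.2 + t.2)

lemma pvShift_inj (t : Int × Int) : Function.Injective (pvShift t) := by
  intro p q h
  simp only [pvShift, Prod.mk.injEq] at h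
  exact Prod.ext (by omega) (by omega)

lemma pvSub_inj (m : Int × Int) :
    Function.Injective (fun p : Int × Int => (p.1 - m.1, p.2 - m.2)) := by
  intro p q h
  simp only [Prod.mk.injEq] at h
  exact Prod.ext (by omega) (by omega)

lemma lex_lt_shift (t p q : Int × Int) :
    toLex (pvShift t p) < toLex (pvShift t q) ↔ toLex p < toLex q := by
  simp only [Prod.Lex.lt_iff, ofLex_toLex, pvShift]
  constructor <;> (intro h; rcases h with h | ⟨h1, h2⟩)
  · exact Or.inl (by omega)
  · exact Or.inr ⟨by omega, by omega⟩
  · exact Or.inl (by omega)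
  · exact Or.inr ⟨by omega, by omega⟩

lemma sorted_map_shift (pos : List (Int × Int)) (h : pos.Nodup) (t : Int × Int) :
    PySem.List.sorted (pos.map (pvShift t)) (fun p => toLex p)
      = (PySem.List.sorted pos (fun p => toLex p)).map (pvShift t) := by
  apply PySem.List.sorted_eq_of_perm_of_pairwise_lt
  · exact (PySem.List.sorted_perm pos (fun p => toLex p) false).map (pvShift t)
  · have hp := PySem.List.sorted_pairwise pos (fun p => toLex p)
    have hn : (PySem.List.sorted pos (fun p => toLex p) false).Nodup :=
      ((PySem.List.sorted_perm pos (fun p => toLex p) false).nodup_iff).mpr h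
    have hlt : (PySem.List.sorted pos (fun p => toLex p) false).Pairwise
        (fun a b => toLex a < toLex b) := by
      refine (hp.and hn).imp ?_
      rintro a b ⟨hle, hne⟩
      exact lt_of_le_of_ne hle (fun h' => hne (toLex.injective h'))
    exact List.pairwise_map.mpr (hlt.imp (fun h => (lex_lt_shift t _ _).mpr h))

lemma zip_all_eq_map (dy dx : Int) (xs : List (Int × Int)) : ∀ ys : List (Int × Int),
    xs.length = ys.length →
    (((xs.zip ys).all (fun pq => pq.2 == (pq.1.1 + dy, pq.1.2 + dx))) = true
      ↔ ys = xs.map (fun p => (p.1 + dy, p.2 + dx))) := by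
  induction xs with
  | nil =>
      intro ys h
      cases ys with
      | nil => simp
      | cons y ys => simp at h
  | cons x xs ih =>
      intro ys h
      cases ys with
      | nil => simp at h
      | cons y ys =>
          have h' : xs.length = ys.length := by simpa using h
          simp only [List.zip_cons_cons, List.all_cons, Bool.and_eq_true, beq_iff_eq,
            List.map_cons, List.cons.injEq, ih ys h']

lemma min_shift (c : Int) (ys zs : List Int) (m m' : Int)
    (hmem : ∀ y, y ∈ zs ↔ y ∈ ys.map (· + c))
    (h1 : PySem.List.min? ys (fun x => x) = some m)
    (h2 : PySem.List.min? zs (fun x => x) = some m') : m' = m + c := by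
  have hm := PySem.List.min?_mem h1
  have hmin := PySem.List.min?_isMin h1
  have hm' := PySem.List.min?_mem h2
  have hmin' := PySem.List.min?_isMin h2
  have hmc : m + c ∈ zs := (hmem _).mpr (List.mem_map.mpr ⟨m, hm, rfl⟩)
  have h3 := hmin' _ hmc
  rcases List.mem_map.mp ((hmem _).mp hm') with ⟨y, hy, rfl⟩
  have h4 := hmin y hy
  simp only at h3 h4 ⊢
  omega

-- A's set comparison, characterised as membership equality of the normalized lists
lemma A_iff (pos1 pos2 : List (Int × Int)) (h1 : pos1.Nodup) (h2 : pos2.Nodup)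
    (miny1 minx1 miny2 minx2 : Int) :
    (PySem.Set.equal
      (PySem.Set.ofList (pos1.map (fun p => (p.1 - miny1, p.2 - minx1))))
      (PySem.Set.ofList (pos2.map (fun p => (p.1 - miny2, p.2 - minx2)))) = true)
    ↔ ∀ x, x ∈ pos1.map (fun p => (p.1 - miny1, p.2 - minx1))
          ↔ x ∈ pos2.map (fun p => (p.1 - miny2, p.2 - minx2)) := by
  have n1 := h1.map (pvSub_inj (miny1, minx1))
  have n2 := h2.map (pvSub_inj (miny2, minx2))
  rw [PySem.Set.ofList_eq_self_of_nodup _ n1, PySem.Set.ofList_eq_self_of_nodup _ n2]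
  exact PySem.Set.equal_iff _ _

-- the central equivalence, with the four mins in hand
lemma central (pos1 pos2 : List (Int × Int))
    (hne1 : pos1 ≠ []) (hne2 : pos2 ≠ []) (h1 : pos1.Nodup) (h2 : pos2.Nodup)
    (miny1 minx1 miny2 minx2 : Int)
    (e1 : PySem.List.min? (pos1.map (fun p => p.1)) (fun x => x) = some miny1)
    (e2 : PySem.List.min? (pos1.map (fun p => p.2)) (fun x => x) = some minx1)
    (e3 : PySem.List.min? (pos2.map (fun p => p.1)) (fun x => x) = some miny2)
    (e4 : PySem.List.min? (pos2.map (fun p => p.2)) (fun x => x) = some minx2) :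
    (PySem.Set.equal
      (PySem.Set.ofList (pos1.map (fun p => (p.1 - miny1, p.2 - minx1))))
      (PySem.Set.ofList (pos2.map (fun p => (p.1 - miny2, p.2 - minx2)))))
    = compare_pos_sets_alt pos1 pos2 := by
  have hAiff := A_iff pos1 pos2 h1 h2 miny1 minx1 miny2 minx2
  have nd1 := h1.map (pvSub_inj (miny1, minx1))
  have nd2 := h2.map (pvSub_inj (miny2, minx2))
  by_cases hlen : pos1.length = pos2.length
  · -- lengths agree: B is the zip-all check over the two sorted lists
    have hs1ne : PySem.List.sorted pos1 (fun p => toLex p) ≠ [] := by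
      rw [Ne, PySem.List.sorted_eq_nil_iff]; exact hne1
    have hs2ne : PySem.List.sorted pos2 (fun p => toLex p) ≠ [] := by
      rw [Ne, PySem.List.sorted_eq_nil_iff]; exact hne2
    rcases List.exists_cons_of_ne_nil hs1ne with ⟨a, t1, hA⟩
    rcases List.exists_cons_of_ne_nil hs2ne with ⟨b, t2, hB⟩
    have hBeq : compare_pos_sets_alt pos1 pos2
        = (((a :: t1).zip (b :: t2)).all
            (fun pq => pq.2 == (pq.1.1 + (b.1 - a.1), pq.1.2 + (b.2 - a.2)))) := by
      unfold compare_pos_sets_alt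
      rw [if_neg (by simpa using hlen), hA, hB]
    rw [hBeq]
    have hlenS : (a :: t1).length = (b :: t2).length := by
      rw [← hA, ← hB,
        (PySem.List.sorted_perm pos1 (fun p => toLex p) false).length_eq,
        (PySem.List.sorted_perm pos2 (fun p => toLex p) false).length_eq]
      exact hlen
    apply Bool.eq_iff_iff.mpr
    rw [hAiff, zip_all_eq_map (b.1 - a.1) (b.2 - a.2) (a :: t1) (b :: t2) hlenS]
    constructor
    · -- PA → sorted lists differ by the head offset
      intro hPA
      have t0 : Int × Int := (miny2 - miny1, minx2 - minx1)
      have hcomp : (fun p : Int × Int => (p.1 - miny2, p.2 - minx2)) ∘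
          pvShift (miny2 - miny1, minx2 - minx1)
          = (fun p : Int × Int => (p.1 - miny1, p.2 - minx1)) := by
        funext p
        simp only [Function.comp, pvShift, Prod.mk.injEq]
        exact ⟨by omega, by omega⟩
      have hmem : ∀ x, x ∈ pos1.map (pvShift (miny2 - miny1, minx2 - minx1)) ↔ x ∈ pos2 := by
        intro x
        rw [← List.mem_map_of_injective (pvSub_inj (miny2, minx2))
              (a := x) (l := pos1.map (pvShift (miny2 - miny1, minx2 - minx1))),
            ← List.mem_map_of_injective (pvSub_inj (miny2, minx2)) (a := x) (l := pos2),
            List.map_map, hcomp]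
        exact hPA _
      have hperm2 : (pos1.map (pvShift (miny2 - miny1, minx2 - minx1))).Perm pos2 :=
        (List.perm_ext_iff_of_nodup (h1.map (pvShift_inj _)) h2).mpr hmem
      have hs2eq : PySem.List.sorted pos2 (fun p => toLex p)
          = (PySem.List.sorted pos1 (fun p => toLex p)).map
              (pvShift (miny2 - miny1, minx2 - minx1)) := by
        rw [← sorted_map_shift pos1 h1]
        exact PySem.List.sorted_eq_sorted_of_perm _ _ _ toLex.injective hperm2.symm
      rw [hA, hB, List.map_cons] at hs2eq
      have hb : b = pvShift (miny2 - miny1, minx2 - minx1) a := (List.cons.injEq _ _ _ _ ▸ hs2eq).1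
      have ht2 : t2 = t1.map (pvShift (miny2 - miny1, minx2 - minx1)) :=
        (List.cons.injEq _ _ _ _ ▸ hs2eq).2
      have hfun : (fun p : Int × Int => (p.1 + (b.1 - a.1), p.2 + (b.2 - a.2)))
          = pvShift (miny2 - miny1, minx2 - minx1) := by
        funext p
        simp only [hb, pvShift, Prod.mk.injEq]
        exact ⟨by omega, by omega⟩
      rw [hfun, List.map_cons, ← hb, ← ht2]
    · -- sorted lists differ by a constant offset → PA
      intro hmapeq
      have hp2 : pos2.Perm (pos1.map (pvShift (b.1 - a.1, b.2 - a.2))) := by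
        refine ((PySem.List.sorted_perm pos2 (fun p => toLex p) false).symm.trans ?_)
        rw [hB, hmapeq, ← hA]
        have : (fun p : Int × Int => (p.1 + (b.1 - a.1), p.2 + (b.2 - a.2)))
            = pvShift (b.1 - a.1, b.2 - a.2) := by
          funext p; rfl
        rw [this]
        exact (PySem.List.sorted_perm pos1 (fun p => toLex p) false).map _
      -- mins translate by the offset
      have hmy : miny2 = miny1 + (b.1 - a.1) := by
        refine min_shift _ (pos1.map (fun p => p.1)) (pos2.map (fun p => p.1)) _ _ ?_ e1 e3
        intro y
        rw [(hp2.map (fun p : Int × Int => p.1)).mem_iff, List.map_map, List.map_map]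
        rfl
      have hmx : minx2 = minx1 + (b.2 - a.2) := by
        refine min_shift _ (pos1.map (fun p => p.2)) (pos2.map (fun p => p.2)) _ _ ?_ e2 e4
        intro y
        rw [(hp2.map (fun p : Int × Int => p.2)).mem_iff, List.map_map, List.map_map]
        rfl
      have hcomp : (fun p : Int × Int => (p.1 - miny2, p.2 - minx2)) ∘
          pvShift (b.1 - a.1, b.2 - a.2)
          = (fun p : Int × Int => (p.1 - miny1, p.2 - minx1)) := by
        funext p
        simp only [Function.comp, pvShift, Prod.mk.injEq]
        exact ⟨by omega, by omega⟩
      intro x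
      rw [(hp2.map (fun p : Int × Int => (p.1 - miny2, p.2 - minx2))).mem_iff,
        List.map_map, hcomp]
  · -- lengths differ: B is false; A cannot be true either
    have hBfalse : compare_pos_sets_alt pos1 pos2 = false := by
      unfold compare_pos_sets_alt
      rw [if_pos (by simpa using hlen)]
    rw [hBfalse]
    rcases Bool.eq_false_or_eq_true (PySem.Set.equal
        (PySem.Set.ofList (pos1.map (fun p => (p.1 - miny1, p.2 - minx1))))
        (PySem.Set.ofList (pos2.map (fun p => (p.1 - miny2, p.2 - minx2))))) with h | h
    · -- A true would force equal lengths
      exfalso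
      have hperm := (List.perm_ext_iff_of_nodup nd1 nd2).mpr (hAiff.mp h)
      have := hperm.length_eq
      simp only [List.length_map] at this
      exact hlen this
    · exact h

-- ===== VERDICT (by name: the statement is the Claim_ definition above) =====
theorem compare_pos_sets_spec : Claim_equal_compare_pos_sets := by
  intro pos1 pos2 _ hpre
  obtain ⟨hne1, hne2, hnd1, hnd2⟩ := hpre
  unfold Spec_compare_pos_sets compare_pos_sets
  have m1 : (pos1.map (fun p : Int × Int => p.1)) ≠ [] := by simpa using hne1
  have m2 : (pos1.map (fun p : Int × Int => p.2)) ≠ [] := by simpa using hne1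
  have m3 : (pos2.map (fun p : Int × Int => p.1)) ≠ [] := by simpa using hne2
  have m4 : (pos2.map (fun p : Int × Int => p.2)) ≠ [] := by simpa using hne2
  rcases e1 : PySem.List.min? (pos1.map (fun p => p.1)) (fun x => x) with _ | miny1
  · exact absurd ((PySem.List.min?_eq_none_iff _ _).mp e1) m1
  rcases e2 : PySem.List.min? (pos1.map (fun p => p.2)) (fun x => x) with _ | minx1
  · exact absurd ((PySem.List.min?_eq_none_iff _ _).mp e2) m2
  rcases e3 : PySem.List.min? (pos2.map (fun p => p.1)) (fun x => x) with _ | miny2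
  · exact absurd ((PySem.List.min?_eq_none_iff _ _).mp e3) m3
  rcases e4 : PySem.List.min? (pos2.map (fun p => p.2)) (fun x => x) with _ | minx2
  · exact absurd ((PySem.List.min?_eq_none_iff _ _).mp e4) m4
  rw [e1, e2, e3, e4]
  exact central pos1 pos2 hne1 hne2 hnd1 hnd2 miny1 minx1 miny2 minx2 e1 e2 e3 e4
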